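-- pv_equiv track=rewrite | github.com/MaksShtoika/JenkinsJob | lab1.py | getNumber2
-- ===== SOURCE A (Python) =====
-- def getNumber2(numb):
--     chars = ".,"
--     for c in chars:
--         numb = numb.replace(c, '')
--     len_num = int(len(numb))
--     numb = numb.replace('0','')
--     first_num = int(numb[0])
--     return first_num, len_num
-- ===== SOURCE B (Python) =====
-- def getNumber2(numb):
--     len_num = 0
--     first = None
--     for ch in numb:
--         if ch in ".,":
--             continue
--         len_num += 1
--         if first is None and ch != '0':
--             first = ch
--     first_num = int(first)
--     return first_num, len_num
-- ===== Notes on version B (the rewrite author's own statement) =====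
-- stated objective: simpler
-- what changed: Replaces A's four sequential passes (replace '.', replace ',', len, replace '0', index) by a single fold over the characters maintaining the count of non-'.,' characters and the first non-'.,0' character.
import Mathlib
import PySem

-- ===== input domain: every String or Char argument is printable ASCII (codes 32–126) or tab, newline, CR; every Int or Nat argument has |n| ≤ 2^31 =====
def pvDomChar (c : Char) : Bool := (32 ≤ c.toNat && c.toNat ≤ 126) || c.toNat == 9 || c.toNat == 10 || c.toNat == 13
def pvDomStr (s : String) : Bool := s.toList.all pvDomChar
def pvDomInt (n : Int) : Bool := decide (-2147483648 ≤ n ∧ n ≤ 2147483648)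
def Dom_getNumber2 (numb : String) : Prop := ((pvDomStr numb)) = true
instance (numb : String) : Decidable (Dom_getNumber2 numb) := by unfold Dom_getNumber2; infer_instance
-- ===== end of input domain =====

-- B replaces A's chain of replace/len/replace/index passes by one fold over the characters
-- maintaining the count of non-'.,' characters and the first non-'.,0' character (objective: simpler, one pass).

-- ===== PORT A =====
-- Ported on the List Char side (PySem string primitives are defined over List Char).
def getNumber2 (numb : String) : Int × Int :=
  -- for c in ".,": numb = numb.replace(c, '')
  let s1 := PySem.Chars.replace numb.toList ['.'] []
  let s2 := PySem.Chars.replace s1 [','] []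
  let len_num : Int := PySem.Chars.len s2          -- int(len(numb))
  let s3 := PySem.Chars.replace s2 ['0'] []        -- numb.replace('0','')
  match PySem.List.pyGet? s3 0 with                -- numb[0]; none exactly where Python raises (outside Pre_)
  | none => (0, 0)
  | some c =>
    match PySem.Int.ofChars? [c] with              -- int(numb[0]); none exactly where Python raises (outside Pre_)
    | none => (0, 0)
    | some v => (v, len_num)

-- ===== PORT B =====
def getNumber2_alt (numb : String) : Int × Int :=
  let st := numb.toList.foldl
    (fun (s : Int × Option Char) ch =>
      if ch = '.' ∨ ch = ',' then s
      else (s.1 + 1, if s.2.isNone ∧ ch ≠ '0' then some ch else s.2))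
    ((0 : Int), (none : Option Char))
  match st.2 with
  | none => (0, 0)                                 -- first is still None; Python raises here (outside Pre_)
  | some c =>
    match PySem.Int.ofChars? [c] with
    | none => (0, 0)
    | some v => (v, st.1)

-- ===== PRECONDITION & SPEC =====
-- Pre_: after deleting '.', ',' and '0' some character remains and the first one is a digit
-- (necessarily '1'..'9'); on all other inputs the Python A raises (no value is returned).
def Pre_getNumber2 (numb : String) : Prop :=
  ((numb.toList.filter (fun c => c ≠ '.' ∧ c ≠ ',' ∧ c ≠ '0')).head?.any
    (fun c => c ∈ ['1','2','3','4','5','6','7','8','9'])) = true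
instance (numb : String) : Decidable (Pre_getNumber2 numb) := by unfold Pre_getNumber2; infer_instance

def pvWitness_getNumber2 : String := "12.34"

def Spec_getNumber2 (numb : String) (out : Int × Int) : Prop := out = getNumber2_alt numb
instance (numb : String) (out : Int × Int) : Decidable (Spec_getNumber2 numb out) := by unfold Spec_getNumber2; infer_instance

-- ===== CLAIM (what is proved, stated in full; the proofs are below) =====
def Claim_equal_getNumber2 : Prop := ∀ (numb : String), Dom_getNumber2 numb → Pre_getNumber2 numb → Spec_getNumber2 numb (getNumber2 numb)

-- ===== LEMMAS AND PROOFS =====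

-- Replacing a single character by the empty string is filtering it out.
theorem replace_go_single_empty (ch : Char) (fuel : Nat) (l acc : List Char)
    (h : l.length ≤ fuel) :
    PySem.Chars.replace.go [ch] [] fuel l acc = acc.reverse ++ l.filter (fun c => c ≠ ch) := by
  induction fuel generalizing l acc with
  | zero =>
    cases l with
    | nil => simp [PySem.Chars.replace.go]
    | cons c t => simp at h
  | succ n ih =>
    cases l with
    | nil => simp [PySem.Chars.replace.go]
    | cons c t =>
      simp only [List.length_cons, Nat.add_le_add_iff_right] at h
      by_cases hc : c = ch
      · subst hc
        have hpre : List.isPrefixOf [c] (c :: t) = true := by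
          simp [List.isPrefixOf]
        rw [PySem.Chars.replace.go]
        simp only [hpre, if_true, List.length_cons, List.length_nil, Nat.zero_add,
          List.drop_succ_cons, List.drop_zero, List.reverse_nil, List.nil_append]
        rw [ih t acc h]
        simp
      · have hpre : List.isPrefixOf [ch] (c :: t) = false := by
          simp [List.isPrefixOf]
          exact fun he => absurd he.symm hc
        rw [PySem.Chars.replace.go]
        simp only [hpre, Bool.false_eq_true, if_false]
        rw [ih t (c :: acc) h]
        simp [hc]

theorem replace_single_empty (ch : Char) (s : List Char) :
    PySem.Chars.replace s [ch] [] = s.filter (fun c => c ≠ ch) := by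
  rw [PySem.Chars.replace]
  simp only [List.isEmpty_cons, Bool.false_eq_true, if_false]
  exact replace_go_single_empty ch s.length s [] le_rfl

-- Invariant of B's single fold.
theorem fold_invariant (l : List Char) (n : Int) (fo : Option Char) :
    l.foldl
      (fun (s : Int × Option Char) ch =>
        if ch = '.' ∨ ch = ',' then s
        else (s.1 + 1, if s.2.isNone ∧ ch ≠ '0' then some ch else s.2))
      (n, fo)
    = (n + (l.countP (fun c => c ≠ '.' ∧ c ≠ ',') : Nat),
       fo.or (l.filter (fun c => c ≠ '.' ∧ c ≠ ',' ∧ c ≠ '0')).head?) := by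
  induction l generalizing n fo with
  | nil => simp
  | cons c t ih =>
    simp only [List.foldl_cons]
    by_cases h1 : c = '.'
    · subst h1
      rw [if_pos (Or.inl rfl), ih]
      simp
    · by_cases h2 : c = ','
      · subst h2
        rw [if_pos (Or.inr rfl), ih]
        simp
      · rw [if_neg (by simp [h1, h2])]
        by_cases h0 : c = '0'
        · subst h0
          rw [if_neg (by simp), ih]
          simp only [List.countP_cons, List.filter_cons]
          simp
          omega
        · cases fo with
          | none =>
            rw [if_pos (by simp [h0]), ih]
            simp only [List.countP_cons, List.filter_cons]
            simp [h1, h2, h0]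
            omega
          | some x =>
            rw [if_neg (by simp), ih]
            simp only [List.countP_cons, List.filter_cons]
            simp [h1, h2, h0]
            omega

-- filtering '.' then ',' then '0' in sequence
theorem filter_chain (l : List Char) :
    (l.filter (fun c => c ≠ '.')).filter (fun c => c ≠ ',')
      = l.filter (fun c => c ≠ '.' ∧ c ≠ ',') := by
  rw [List.filter_filter]
  apply List.filter_congr
  intro c _
  simp [and_comm]

theorem filter_chain3 (l : List Char) :
    ((l.filter (fun c => c ≠ '.')).filter (fun c => c ≠ ',')).filter (fun c => c ≠ '0')
      = l.filter (fun c => c ≠ '.' ∧ c ≠ ',' ∧ c ≠ '0') := by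
  rw [filter_chain, List.filter_filter]
  apply List.filter_congr
  intro c _
  simp [Bool.and_comm, Bool.and_left_comm, Bool.and_assoc]

theorem pyGet?_zero_head (l : List Char) : PySem.List.pyGet? l 0 = l.head? := by
  cases l <;> simp [PySem.List.pyGet?, PySem.List.pyIdx?]

-- ===== VERDICT (by name: the statement is the Claim_ definition above) =====
theorem getNumber2_spec : Claim_equal_getNumber2 := by
  intro numb _ _
  have hs2 : PySem.Chars.replace (PySem.Chars.replace numb.toList ['.'] []) [','] []
      = numb.toList.filter (fun c => c ≠ '.' ∧ c ≠ ',') := by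
    rw [replace_single_empty, replace_single_empty]
    exact filter_chain numb.toList
  have hs3 : PySem.Chars.replace (PySem.Chars.replace (PySem.Chars.replace numb.toList ['.'] []) [','] []) ['0'] []
      = numb.toList.filter (fun c => c ≠ '.' ∧ c ≠ ',' ∧ c ≠ '0') := by
    rw [replace_single_empty, replace_single_empty, replace_single_empty]
    exact filter_chain3 numb.toList
  have hlen : (PySem.Chars.len (PySem.Chars.replace (PySem.Chars.replace numb.toList ['.'] []) [','] []) : Int)
      = ((numb.toList.countP (fun c => c ≠ '.' ∧ c ≠ ',') : Nat) : Int) := by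
    rw [hs2, PySem.Chars.len_eq, ← List.countP_eq_length_filter]
  show Spec_getNumber2 numb (getNumber2 numb)
  unfold Spec_getNumber2
  simp only [getNumber2, getNumber2_alt, fold_invariant, hs3, hlen, pyGet?_zero_head,
    Option.none_or, Int.zero_add]
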